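-- pv_equiv track=rewrite | github.com/ariffazil/arifosmcp | runtime/webmcp/security.py | _categorize_threats
-- ===== SOURCE A (Python) =====
-- from typing import Any, Optional
--
-- def _categorize_threats(threats: list[str]) -> Optional[str]:
--     """Categorize the type of threat."""
--     if not threats:
--         return None
--
--     categories = {
--         'xss': ['xss_script', 'xss_protocol', 'xss_data_uri', 'xss_event_handler'],
--         'injection': ['sql_union', 'sql_drop', 'sql_or', 'command_injection'],
--         'prompt': ['ignore_prompt', 'forget_prompt', 'role_change', 'system_override'],
--         'traversal': ['path_traversal', 'path_traversal_win', 'path_traversal_encoded'],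
--     }
--
--     for category, patterns in categories.items():
--         if any(t in patterns for t in threats):
--             return category
--
--     return 'mixed'
-- ===== SOURCE B (Python) =====
-- from typing import Optional
--
-- _CATEGORIES = {
--     'xss': ['xss_script', 'xss_protocol', 'xss_data_uri', 'xss_event_handler'],
--     'injection': ['sql_union', 'sql_drop', 'sql_or', 'command_injection'],
--     'prompt': ['ignore_prompt', 'forget_prompt', 'role_change', 'system_override'],
--     'traversal': ['path_traversal', 'path_traversal_win', 'path_traversal_encoded'],
-- }
--
-- # reverse index: pattern -> category, built once
-- _REV = {p: cat for cat, pats in _CATEGORIES.items() for p in pats}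
--
--
-- def _categorize_threats(threats: list[str]) -> Optional[str]:
--     """Categorize the type of threat."""
--     if not threats:
--         return None
--     matched = {_REV[t] for t in threats if t in _REV}
--     for cat in ('xss', 'injection', 'prompt', 'traversal'):
--         if cat in matched:
--             return cat
--     return 'mixed'
-- ===== Notes on version B (the rewrite author's own statement) =====
-- stated objective: idiomatic
-- what changed: Replaces the nested per-category scan of the threat list by a precomputed reverse pattern-to-category index, one single pass over the threats collecting the set of matched categories, and a fixed priority-ordered resolution.
import Mathlib
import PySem

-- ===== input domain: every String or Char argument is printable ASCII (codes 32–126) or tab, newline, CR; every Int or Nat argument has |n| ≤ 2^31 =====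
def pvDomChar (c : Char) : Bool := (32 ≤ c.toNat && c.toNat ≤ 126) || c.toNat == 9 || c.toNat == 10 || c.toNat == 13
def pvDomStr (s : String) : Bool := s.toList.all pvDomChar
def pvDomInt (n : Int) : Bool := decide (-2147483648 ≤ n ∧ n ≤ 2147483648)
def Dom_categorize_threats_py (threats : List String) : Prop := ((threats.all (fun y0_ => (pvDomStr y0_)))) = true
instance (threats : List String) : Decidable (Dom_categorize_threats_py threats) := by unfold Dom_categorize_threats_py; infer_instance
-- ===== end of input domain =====

-- B replaces the nested per-category scan by a reverse pattern→category index, a single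
-- pass over the threats collecting the matched categories, and a priority resolution (idiomatic).

-- ===== PORT A =====
-- the literal `categories` dict of A, as an association list in insertion order
def pvCategoriesA : List (String × List String) :=
  [("xss", ["xss_script", "xss_protocol", "xss_data_uri", "xss_event_handler"]),
   ("injection", ["sql_union", "sql_drop", "sql_or", "command_injection"]),
   ("prompt", ["ignore_prompt", "forget_prompt", "role_change", "system_override"]),
   ("traversal", ["path_traversal", "path_traversal_win", "path_traversal_encoded"])]

-- the `for category, patterns in categories.items()` loop with its early return
def pvLoopA (threats : List String) : List (String × List String) → Option String
  | [] => some "mixed"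
  | (category, patterns) :: rest =>
      if threats.any (fun t => patterns.contains t) then some category
      else pvLoopA threats rest

def categorize_threats_py (threats : List String) : Option String :=
  if threats = [] then none
  else pvLoopA threats pvCategoriesA

-- ===== PORT B =====
-- _REV = {p: cat for cat, pats in _CATEGORIES.items() for p in pats}
def pvRev : PySem.Dict String String :=
  PySem.Dict.ofList (pvCategoriesA.flatMap (fun cp => cp.2.map (fun p => (p, cp.1))))

-- matched = {_REV[t] for t in threats if t in _REV}
def pvMatched (threats : List String) : PySem.Set String :=
  threats.foldl (fun s t => match pvRev.get? t with
    | some c => PySem.Set.add s c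
    | none => s) PySem.Set.empty

-- the priority-resolution loop `for cat in (...): if cat in matched: return cat`
def pvPick (matched : PySem.Set String) : List String → Option String
  | [] => some "mixed"
  | c :: rest => if PySem.Set.contains matched c then some c else pvPick matched rest

def categorize_threats_py_alt (threats : List String) : Option String :=
  if threats = [] then none
  else pvPick (pvMatched threats) ["xss", "injection", "prompt", "traversal"]

-- ===== PRECONDITION & SPEC =====
def Spec_categorize_threats_py (threats : List String) (out : Option String) : Prop := out = categorize_threats_py_alt threats
instance (threats : List String) (out : Option String) : Decidable (Spec_categorize_threats_py threats out) := by unfold Spec_categorize_threats_py; infer_instance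

-- ===== CLAIM (what is proved, stated in full; the proofs are below) =====
def Claim_equal_categorize_threats_py : Prop := ∀ (threats : List String), Dom_categorize_threats_py threats → Spec_categorize_threats_py threats (categorize_threats_py threats)


-- ===== LEMMAS AND PROOFS =====

-- the 15 pattern strings = the keys of the reverse index, in order
def pvKeys : List String :=
  ["xss_script", "xss_protocol", "xss_data_uri", "xss_event_handler",
   "sql_union", "sql_drop", "sql_or", "command_injection",
   "ignore_prompt", "forget_prompt", "role_change", "system_override",
   "path_traversal", "path_traversal_win", "path_traversal_encoded"]

-- the reverse index maps t to c exactly when t is in c's pattern list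
theorem rev_get_iff (t c : String) (pats : List String)
    (hpos : ∀ p ∈ pats, pvRev.get? p = some c)
    (hneg : ∀ p ∈ pvKeys, pvRev.get? p = some c → p ∈ pats)
    (hkeys : pvRev.keys = pvKeys) :
    (pvRev.get? t = some c) ↔ t ∈ pats := by
  constructor
  · intro h
    by_cases hk : t ∈ pvKeys
    · exact hneg t hk h
    · rw [(PySem.Dict.get?_eq_none_iff_not_mem_keys pvRev t).mpr (hkeys ▸ hk)] at h
      cases h
  · exact fun hm => hpos t hm

theorem pvMatched_mem (threats : List String) (s : PySem.Set String) (c : String) :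
    c ∈ threats.foldl (fun s t => match pvRev.get? t with
        | some c => PySem.Set.add s c
        | none => s) s ↔ c ∈ s ∨ ∃ t ∈ threats, pvRev.get? t = some c := by
  induction threats generalizing s with
  | nil => simp
  | cons t rest ih =>
    simp only [List.foldl_cons, List.mem_cons, ih]
    cases h : pvRev.get? t with
    | none =>
      constructor
      · rintro (hs | ht); · exact Or.inl hs
        · obtain ⟨u, hu, hg⟩ := ht
          exact Or.inr ⟨u, Or.inr hu, hg⟩
      · rintro (hs | ⟨u, hu, hg⟩); · exact Or.inl hs
        · rcases hu with rfl | hu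
          · simp [h] at hg
          · exact Or.inr ⟨u, hu, hg⟩
    | some c' =>
      rw [PySem.Set.mem_add]
      constructor
      · rintro ((hs | rfl) | ht)
        · exact Or.inl hs
        · exact Or.inr ⟨t, Or.inl rfl, h⟩
        · obtain ⟨u, hu, hg⟩ := ht
          exact Or.inr ⟨u, Or.inr hu, hg⟩
      · rintro (hs | ⟨u, hu, hg⟩); · exact Or.inl (Or.inl hs)
        · rcases hu with rfl | hu
          · rw [h] at hg
            exact Or.inl (Or.inr ((Option.some.inj hg).symm))
          · exact Or.inr ⟨u, hu, hg⟩

-- membership of a category in B's matched set = A's per-category any-scan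
theorem contains_matched (threats : List String) (c : String) (pats : List String)
    (hc : ∀ t, (pvRev.get? t = some c) ↔ t ∈ pats) :
    PySem.Set.contains (pvMatched threats) c = threats.any (fun t => pats.contains t) := by
  rcases hA : threats.any (fun t => pats.contains t) with _ | _
  · rw [Bool.eq_false_iff]
    intro hcon
    rw [PySem.Set.contains_iff, pvMatched, pvMatched_mem] at hcon
    rcases hcon with h | ⟨t, ht, hg⟩
    · simp [PySem.Set.empty] at h
    · rw [List.any_eq_false] at hA
      exact absurd ((hc t).mp hg) (by simpa using hA t ht)
  · rw [List.any_eq_true] at hA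
    rcases hA with ⟨t, ht, hp⟩
    rw [PySem.Set.contains_iff, pvMatched, pvMatched_mem]
    exact Or.inr ⟨t, ht, (hc t).mpr (by simpa using hp)⟩

-- ===== VERDICT (by name: the statement is the Claim_ definition above) =====
theorem categorize_threats_py_spec : Claim_equal_categorize_threats_py := by
  intro threats _
  unfold Spec_categorize_threats_py categorize_threats_py categorize_threats_py_alt
  by_cases h : threats = []
  · simp [h]
  · simp only [if_neg h]
    have hx := contains_matched threats "xss" ["xss_script", "xss_protocol", "xss_data_uri", "xss_event_handler"]
      (fun t => rev_get_iff t _ _ (by decide) (by decide) (by decide))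
    have hi := contains_matched threats "injection" ["sql_union", "sql_drop", "sql_or", "command_injection"]
      (fun t => rev_get_iff t _ _ (by decide) (by decide) (by decide))
    have hp := contains_matched threats "prompt" ["ignore_prompt", "forget_prompt", "role_change", "system_override"]
      (fun t => rev_get_iff t _ _ (by decide) (by decide) (by decide))
    have ht := contains_matched threats "traversal" ["path_traversal", "path_traversal_win", "path_traversal_encoded"]
      (fun t => rev_get_iff t _ _ (by decide) (by decide) (by decide))
    simp only [pvLoopA, pvPick, pvCategoriesA, hx, hi, hp, ht]
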